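-- pv_equiv track=rewrite | github.com/Gabrielbs182/CalcIPV4PY | calc.py | separar
-- ===== SOURCE A (Python) =====
-- def separar(n): #Transforma uma string em lista de numeros inteiros.
--
--   linha = ""
--   lista = []
--   n += "."
--   for x in n:
--     if x != ".": #usando o ponto para separar os vertices.
--       linha += x
--     else:
--       mat = int(linha) #transformo o numero de str para int.
--       lista.append(mat) #Adiciono a um vertice na lista em INT.
--       linha = "" #reinicio o valor da
--   return lista
-- ===== SOURCE B (Python) =====
-- def separar(n):  # Transforma uma string em lista de numeros inteiros.
--     # Split once into tokens, then map int over the tokens (no char scan / sentinel dot).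
--     return [int(x) for x in n.split('.')]
-- ===== Notes on version B (the rewrite author's own statement) =====
-- stated objective: idiomatic
-- what changed: A scans character-by-character, accumulating a buffer and flushing it on a sentinel dot appended to the input; B splits the string into tokens once with str.split('.') and maps int over the token list.
import Mathlib
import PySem

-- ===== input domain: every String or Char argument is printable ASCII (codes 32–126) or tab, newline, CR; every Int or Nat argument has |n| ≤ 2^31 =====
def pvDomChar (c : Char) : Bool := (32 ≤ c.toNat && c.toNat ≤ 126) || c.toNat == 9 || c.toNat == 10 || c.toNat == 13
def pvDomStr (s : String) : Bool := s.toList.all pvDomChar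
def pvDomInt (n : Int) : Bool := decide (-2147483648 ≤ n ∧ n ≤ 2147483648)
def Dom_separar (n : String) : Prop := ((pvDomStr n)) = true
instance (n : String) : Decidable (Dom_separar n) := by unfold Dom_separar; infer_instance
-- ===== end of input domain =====

-- B replaces A's char-by-char scan (buffer + sentinel-dot flush) by one str.split('.')
-- followed by a map of int over the tokens (idiomatic; same cost).

-- ===== PORT A =====
-- the char loop of A: state (linha, lista); int(linha) is ofStr?; under Pre_ every
-- flushed buffer parses, so the .getD 0 default is never reached inside Pre_.
def separarLoop : List Char → String → List Int → List Int
  | [], _, lista => lista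
  | x :: xs, linha, lista =>
    if x ≠ '.' then separarLoop xs (linha.push x) lista
    else separarLoop xs "" (lista ++ [(PySem.Int.ofStr? linha).getD 0])

def separar (n : String) : List Int :=
  separarLoop (n ++ ".").toList "" []

-- ===== PORT B =====
-- Source B: [int(x) for x in n.split('.')]; single-char str.split ported as List.splitOn.
def separar_alt (n : String) : List Int :=
  (n.toList.splitOn '.').map (fun t => (PySem.Int.ofChars? t).getD 0)

-- ===== PRECONDITION & SPEC =====
-- A raises ValueError (int() on a bad token) exactly when
-- some dot-separated token of n is not a valid int literal; Pre_ admits the rest.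
def Pre_separar (n : String) : Prop :=
  ∀ t ∈ n.toList.splitOn '.', (PySem.Int.ofChars? t).isSome = true
instance (n : String) : Decidable (Pre_separar n) := by unfold Pre_separar; infer_instance
def pvWitness_separar : String := "192.168.0.1"
def Spec_separar (n : String) (out : List Int) : Prop := out = separar_alt n
instance (n : String) (out : List Int) : Decidable (Spec_separar n out) := by unfold Spec_separar; infer_instance

-- ===== CLAIM (what is proved, stated in full; the proofs are below) =====
def Claim_equal_separar : Prop := ∀ (n : String), Dom_separar n → Pre_separar n → Spec_separar n (separar n)

-- ===== LEMMAS AND PROOFS =====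

-- the loop over cs ++ ['.'] flushes exactly the '.'-separated tokens of linha ++ cs
lemma separarLoop_eq (cs : List Char) : ∀ (linha : String) (lista : List Int),
    '.' ∉ linha.toList →
    separarLoop (cs ++ ['.']) linha lista
      = lista ++ ((linha.toList ++ cs).splitOn '.').map
          (fun t => (PySem.Int.ofChars? t).getD 0) := by
  induction cs with
  | nil =>
    intro linha lista h
    have hs : linha.toList.splitOn '.' = [linha.toList] := by
      simp only [List.splitOn]
      exact List.splitOnP_eq_single _ _
        (fun x hx (hxe : (x == '.') = true) => h ((beq_iff_eq.mp hxe) ▸ hx))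
    simp only [List.nil_append, separarLoop, List.append_nil, hs]
    rw [if_neg (by decide)]
    simp [PySem.Int.ofStr?]
  | cons c cs ih =>
    intro linha lista h
    by_cases hc : c = '.'
    · subst hc
      have key : (linha.toList ++ '.' :: cs).splitOn '.' = linha.toList :: cs.splitOn '.' := by
        simp only [List.splitOn]
        exact List.splitOnP_first _ _
          (fun x hx (hxe : (x == '.') = true) => h ((beq_iff_eq.mp hxe) ▸ hx))
          '.' (by decide) cs
      simp only [List.cons_append, separarLoop]
      rw [if_neg (by decide), ih "" (lista ++ [(PySem.Int.ofStr? linha).getD 0]) (by simp), key]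
      simp [PySem.Int.ofStr?]
    · simp only [List.cons_append, separarLoop]
      rw [if_pos (by simpa using hc),
        ih (linha.push c) lista (by simp [String.toList_push]; exact ⟨h, Ne.symm hc⟩)]
      simp [String.toList_push]

-- ===== VERDICT (by name: the statement is the Claim_ definition above) =====
theorem separar_spec : Claim_equal_separar := by
  intro n _ _
  show separar n = separar_alt n
  unfold separar separar_alt
  rw [show (n ++ ".").toList = n.toList ++ ['.'] by simp,
      separarLoop_eq n.toList "" [] (by simp)]
  simp
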